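-- pv_equiv track=rewrite | github.com/lsst-uk/lasair-lsst | pipeline/filter/alerts/sherlock.py | create_insert_sherlock
-- ===== SOURCE A (Python) =====
-- def create_insert_sherlock(ann: dict):
--     """create_insert_sherlock.
--     Makes the insert query for the sherlock classification
--
--     Args:
--         ann:
--     """
--     # all the sherlock attrs that we want for the database
--     attrs = [
--         "classification",
--         "diaObjectId",
--         "association_type",
--         "catalogue_table_name",
--         "catalogue_object_id",
--         "catalogue_object_type",
--         "raDeg",
--         "decDeg",
--         "separationArcsec",
--         "northSeparationArcsec",
--         "eastSeparationArcsec",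
--         "physical_separation_kpc",
--         "direct_distance",
--         "distance",
--         "best_distance",
--         "best_distance_flag",
--         "best_distance_source",
--         "z",
--         "photoZ",
--         "photoZErr",
--         "Mag",
--         "MagFilter",
--         "MagErr",
--         "classificationReliability",
--         "major_axis_arcsec",
--         "annotator",
--         "additional_output",
--         "description",
--         "summary",
--     ]
--     sets = {}
--     for key in attrs:
--         sets[key] = None
--     for key, value in ann.items():
--         if key in attrs and value:
--             sets[key] = value
--
--     # this hack adds back in the deprecated 'distance' as 'best_distance'
--     if 'best_distance' in ann:
--         sets['distance'] = ann['best_distance']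
--
--     if 'description' in attrs and 'description' not in ann:
--         sets['description'] = 'no description'
--     # Build the query
--     query_list = []
--     query = 'REPLACE INTO sherlock_classifications SET '
--     for key, value in sets.items():
--         if value is None:
--             query_list.append(key + '=NULL')
--         else:
--             query_list.append(key + '=' + "'" + str(value).replace("'", '') + "'")
--     query += ',\n'.join(query_list)
--     return query
-- ===== SOURCE B (Python) =====
-- ATTRS = [
--     "classification",
--     "diaObjectId",
--     "association_type",
--     "catalogue_table_name",
--     "catalogue_object_id",
--     "catalogue_object_type",
--     "raDeg",
--     "decDeg",
--     "separationArcsec",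
--     "northSeparationArcsec",
--     "eastSeparationArcsec",
--     "physical_separation_kpc",
--     "direct_distance",
--     "distance",
--     "best_distance",
--     "best_distance_flag",
--     "best_distance_source",
--     "z",
--     "photoZ",
--     "photoZErr",
--     "Mag",
--     "MagFilter",
--     "MagErr",
--     "classificationReliability",
--     "major_axis_arcsec",
--     "annotator",
--     "additional_output",
--     "description",
--     "summary",
-- ]
--
--
-- def _value_for(ann, key):
--     """Value for one column: None means NULL."""
--     if key == 'distance' and 'best_distance' in ann:
--         # deprecated 'distance' carries 'best_distance', even when falsy
--         return ann['best_distance']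
--     if key == 'description' and 'description' not in ann:
--         return 'no description'
--     v = ann.get(key)
--     return v if v else None
--
--
-- def _fmt(key, value):
--     if value is None:
--         return key + '=NULL'
--     return key + "='" + str(value).replace("'", '') + "'"
--
--
-- def create_insert_sherlock(ann: dict):
--     return 'REPLACE INTO sherlock_classifications SET ' + \
--         ',\n'.join(_fmt(key, _value_for(ann, key)) for key in ATTRS)
-- ===== Notes on version B (the rewrite author's own statement) =====
-- stated objective: alternative
-- what changed: B builds the query in a single pass over the fixed column list, computing each column's value by direct dict lookup (with the distance/description special cases inline), instead of A's two-phase approach of initialising a dict of NULL defaults, scanning the whole input dict to overwrite entries, patching it, and then iterating the dict; Pre_ excludes association lists with duplicate keys, which cannot occur as a Python dict input.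
import Mathlib
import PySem

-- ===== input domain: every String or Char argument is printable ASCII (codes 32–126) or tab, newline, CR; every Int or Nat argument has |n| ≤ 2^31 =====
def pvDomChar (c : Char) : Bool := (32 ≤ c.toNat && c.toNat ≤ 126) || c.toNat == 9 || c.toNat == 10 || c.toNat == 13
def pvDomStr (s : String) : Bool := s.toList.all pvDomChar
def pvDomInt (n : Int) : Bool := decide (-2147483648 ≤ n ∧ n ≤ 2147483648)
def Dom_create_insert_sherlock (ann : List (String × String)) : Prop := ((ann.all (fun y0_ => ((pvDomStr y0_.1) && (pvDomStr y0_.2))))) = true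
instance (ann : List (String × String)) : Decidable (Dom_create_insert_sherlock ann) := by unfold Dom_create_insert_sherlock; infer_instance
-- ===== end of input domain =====

-- B builds the query in one pass over the fixed column list (one lookup per column) instead of
-- A's dict of defaults mutated by a scan of the input dict; same return value (objective: alternative decomposition).

-- ===== PORT A =====
def pvAttrsA : List String :=
  ["classification", "diaObjectId", "association_type", "catalogue_table_name",
   "catalogue_object_id", "catalogue_object_type", "raDeg", "decDeg",
   "separationArcsec", "northSeparationArcsec", "eastSeparationArcsec",
   "physical_separation_kpc", "direct_distance", "distance", "best_distance",
   "best_distance_flag", "best_distance_source", "z", "photoZ", "photoZErr",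
   "Mag", "MagFilter", "MagErr", "classificationReliability",
   "major_axis_arcsec", "annotator", "additional_output", "description", "summary"]

def create_insert_sherlock (ann : List (String × String)) : String :=
  let sets := pvAttrsA.foldl (fun d key => d.insert key (none : Option String)) PySem.Dict.empty
  let sets := ann.foldl (fun d kv =>
      if pvAttrsA.contains kv.1 && kv.2 != "" then d.insert kv.1 (some kv.2) else d) sets
  let sets := match (PySem.Dict.mk ann).get? "best_distance" with
      | some bd => sets.insert "distance" (some bd)
      | none => sets
  let sets := if pvAttrsA.contains "description" && !(PySem.Dict.mk ann).contains "description"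
      then sets.insert "description" (some "no description") else sets
  let queryList := sets.items.foldl (fun acc kv =>
      acc ++ [match kv.2 with
              | none => kv.1 ++ "=NULL"
              | some v => kv.1 ++ "='" ++ PySem.Str.replace v "'" "" ++ "'"]) []
  "REPLACE INTO sherlock_classifications SET " ++ PySem.Str.join ",\n" queryList

-- ===== PORT B =====
def pvAttrsB : List String :=
  ["classification", "diaObjectId", "association_type", "catalogue_table_name",
   "catalogue_object_id", "catalogue_object_type", "raDeg", "decDeg",
   "separationArcsec", "northSeparationArcsec", "eastSeparationArcsec",
   "physical_separation_kpc", "direct_distance", "distance", "best_distance",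
   "best_distance_flag", "best_distance_source", "z", "photoZ", "photoZErr",
   "Mag", "MagFilter", "MagErr", "classificationReliability",
   "major_axis_arcsec", "annotator", "additional_output", "description", "summary"]

def pvValueFor (ann : List (String × String)) (key : String) : Option String :=
  if key == "distance" && (PySem.Dict.mk ann).contains "best_distance" then
    (PySem.Dict.mk ann).get? "best_distance"
  else if key == "description" && !(PySem.Dict.mk ann).contains "description" then
    some "no description"
  else
    match (PySem.Dict.mk ann).get? key with
    | some v => if v != "" then some v else none
    | none => none

def pvFmt (key : String) (value : Option String) : String :=
  match value with
  | none => key ++ "=NULL"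
  | some v => key ++ "='" ++ PySem.Str.replace v "'" "" ++ "'"

def create_insert_sherlock_alt (ann : List (String × String)) : String :=
  "REPLACE INTO sherlock_classifications SET " ++
    PySem.Str.join ",\n" (pvAttrsB.map (fun key => pvFmt key (pvValueFor ann key)))

-- ===== PRECONDITION & SPEC =====
-- Pre_ excludes association lists with duplicate keys: they do not represent a Python dict
-- (A's input type), and on them A's last-write-wins scan versus a first-match lookup is accidental.
def Pre_create_insert_sherlock (ann : List (String × String)) : Prop := (ann.map Prod.fst).Nodup
instance (ann : List (String × String)) : Decidable (Pre_create_insert_sherlock ann) := by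
  unfold Pre_create_insert_sherlock; infer_instance

def pvWitness_create_insert_sherlock : (List (String × String)) :=
  [("classification", "SN"), ("best_distance", "12.3"), ("summary", "")]

def Spec_create_insert_sherlock (ann : List (String × String)) (out : String) : Prop := out = create_insert_sherlock_alt ann
instance (ann : List (String × String)) (out : String) : Decidable (Spec_create_insert_sherlock ann out) := by unfold Spec_create_insert_sherlock; infer_instance

-- ===== CLAIM (what is proved, stated in full; the proofs are below) =====
def Claim_equal_create_insert_sherlock : Prop := ∀ (ann : List (String × String)), Dom_create_insert_sherlock ann → Pre_create_insert_sherlock ann → Spec_create_insert_sherlock ann (create_insert_sherlock ann)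

-- ===== LEMMAS AND PROOFS =====

-- proof-side names for A's successive dict states (definitionally the port's lets)
def pvS1 (ann : List (String × String)) : PySem.Dict String (Option String) :=
  ann.foldl (fun d kv =>
      if pvAttrsA.contains kv.1 && kv.2 != "" then d.insert kv.1 (some kv.2) else d)
    (pvAttrsA.foldl (fun d key => d.insert key (none : Option String)) PySem.Dict.empty)

def pvS3 (ann : List (String × String)) : PySem.Dict String (Option String) :=
  if pvAttrsA.contains "description" && !(PySem.Dict.mk ann).contains "description"
  then (match (PySem.Dict.mk ann).get? "best_distance" with
        | some bd => (pvS1 ann).insert "distance" (some bd)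
        | none => pvS1 ann).insert "description" (some "no description")
  else (match (PySem.Dict.mk ann).get? "best_distance" with
        | some bd => (pvS1 ann).insert "distance" (some bd)
        | none => pvS1 ann)

-- initialising loop: every key defaults to none
lemma pv_init_getD_aux (L : List String) (d : PySem.Dict String (Option String)) (k : String)
    (hd : d.getD k none = none) :
    (L.foldl (fun d key => d.insert key (none : Option String)) d).getD k none = none := by
  induction L generalizing d with
  | nil => exact hd
  | cons a rest ih =>
    simp only [List.foldl_cons]
    apply ih
    rw [PySem.Dict.getD_insert]
    split_ifs <;> simp [hd]

lemma pv_init_getD (k : String) :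
    (pvAttrsA.foldl (fun d key => d.insert key (none : Option String)) PySem.Dict.empty).getD k none
      = none :=
  pv_init_getD_aux pvAttrsA PySem.Dict.empty k (PySem.Dict.getD_empty k none)

-- the per-key value A's scan loop leaves in the dict
lemma pv_foldl_getD (l : List (String × String)) (d : PySem.Dict String (Option String)) (k : String) :
    (l.foldl (fun d kv =>
        if pvAttrsA.contains kv.1 && kv.2 != "" then d.insert kv.1 (some kv.2) else d) d).getD k none
    = l.foldl (fun v kv =>
        if pvAttrsA.contains kv.1 && kv.2 != "" then (if kv.1 = k then some kv.2 else v) else v)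
        (d.getD k none) := by
  induction l generalizing d with
  | nil => rfl
  | cons kv rest ih =>
    simp only [List.foldl_cons]
    by_cases h : (pvAttrsA.contains kv.1 && kv.2 != "") = true
    · rw [if_pos h, if_pos h, ih, PySem.Dict.getD_insert]
      congr 1
      by_cases hkk : kv.1 = k
      · rw [if_pos hkk.symm, if_pos hkk]
      · rw [if_neg (fun h' => hkk h'.symm), if_neg hkk]
    · rw [if_neg h, if_neg h]
      exact ih d

-- the scan loop leaves the key list untouched (it only overwrites keys of attrs)
lemma pv_foldl_keys (l : List (String × String)) (d : PySem.Dict String (Option String))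
    (hd : d.keys = pvAttrsA) :
    (l.foldl (fun d kv =>
        if pvAttrsA.contains kv.1 && kv.2 != "" then d.insert kv.1 (some kv.2) else d) d).keys
    = pvAttrsA := by
  induction l generalizing d with
  | nil => exact hd
  | cons kv rest ih =>
    simp only [List.foldl_cons]
    split_ifs with h
    · apply ih
      have hmem : kv.1 ∈ pvAttrsA := by
        have h1 := ((Bool.and_eq_true _ _).mp h).1
        simpa using h1
      have hcont : d.contains kv.1 = true :=
        (PySem.Dict.contains_iff_mem_keys d kv.1).mpr (by rw [hd]; exact hmem)
      rw [PySem.Dict.keys_insert_of_contains d _ hcont]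
      exact hd
    · exact ih d hd

lemma pv_foldl_val_of_not_mem (l : List (String × String)) (k : String) (init : Option String)
    (h : k ∉ l.map Prod.fst) :
    l.foldl (fun v kv =>
        if pvAttrsA.contains kv.1 && kv.2 != "" then (if kv.1 = k then some kv.2 else v) else v)
      init = init := by
  induction l generalizing init with
  | nil => rfl
  | cons kv rest ih =>
    simp only [List.map_cons, List.mem_cons, not_or] at h
    obtain ⟨h1, h2⟩ := h
    simp only [List.foldl_cons]
    have hstep : (if (pvAttrsA.contains kv.1 && kv.2 != "") = true
        then (if kv.1 = k then some kv.2 else init) else init) = init := by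
      split_ifs with hc hk
      · exact absurd hk.symm h1
      · rfl
      · rfl
    rw [hstep]
    exact ih init h2

-- with distinct keys, last-truthy-write equals first-match lookup filtered by truthiness
lemma pv_foldl_val_nodup (l : List (String × String)) (k : String) (init : Option String)
    (hnd : (l.map Prod.fst).Nodup) (hk : pvAttrsA.contains k = true) :
    l.foldl (fun v kv =>
        if pvAttrsA.contains kv.1 && kv.2 != "" then (if kv.1 = k then some kv.2 else v) else v)
      init
    = match (PySem.Dict.mk l).get? k with
      | some v => if v != "" then some v else init
      | none => init := by
  induction l generalizing init with
  | nil => rfl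
  | cons kv rest ih =>
    obtain ⟨a, b⟩ := kv
    have hnds : (a ∉ rest.map Prod.fst) ∧ (rest.map Prod.fst).Nodup := by
      simpa using hnd
    simp only [List.foldl_cons, PySem.Dict.get?_mk_cons]
    by_cases ha : a = k
    · subst ha
      rw [pv_foldl_val_of_not_mem rest a _ hnds.1]
      by_cases hb : (b != "") = true
      · rw [if_pos (by rw [hk, Bool.true_and]; exact hb), if_pos rfl]
        simp [hb]
      · rw [if_neg (by rw [hk, Bool.true_and]; exact hb)]
        simp [hb]
    · have hbeq : (a == k) = false := by simp [ha]
      have hstep : (if (pvAttrsA.contains a && b != "") = true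
          then (if a = k then some b else init) else init) = init := by
        by_cases hc : (pvAttrsA.contains a && b != "") = true <;> simp [ha]
      rw [hstep, ih init hnds.2]
      simp [hbeq]

-- the base value of each attrs key after the scan
lemma pv_base_val (ann : List (String × String)) (k : String)
    (hpre : (ann.map Prod.fst).Nodup) (hk : pvAttrsA.contains k = true) :
    (pvS1 ann).getD k none
    = match (PySem.Dict.mk ann).get? k with
      | some v => if v != "" then some v else none
      | none => none := by
  unfold pvS1
  rw [pv_foldl_getD, pv_init_getD, pv_foldl_val_nodup ann k none hpre hk]

-- keys after all inserts are exactly attrs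
lemma pv_keys_s1 (ann : List (String × String)) : (pvS1 ann).keys = pvAttrsA := by
  unfold pvS1
  apply pv_foldl_keys
  decide

lemma pv_keys_s3 (ann : List (String × String)) : (pvS3 ann).keys = pvAttrsA := by
  have hdist : (pvS1 ann).contains "distance" = true :=
    (PySem.Dict.contains_iff_mem_keys _ _).mpr (by rw [pv_keys_s1]; decide)
  unfold pvS3
  cases hbd : (PySem.Dict.mk ann).get? "best_distance" with
  | none =>
    split_ifs with h
    · have hdesc : (pvS1 ann).contains "description" = true :=
        (PySem.Dict.contains_iff_mem_keys _ _).mpr (by rw [pv_keys_s1]; decide)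
      rw [PySem.Dict.keys_insert_of_contains _ _ hdesc]
      exact pv_keys_s1 ann
    · exact pv_keys_s1 ann
  | some bd =>
    split_ifs with h
    · have hdesc : ((pvS1 ann).insert "distance" (some bd)).contains "description" = true :=
        (PySem.Dict.contains_iff_mem_keys _ _).mpr
          (by rw [PySem.Dict.keys_insert_of_contains _ _ hdist, pv_keys_s1]; decide)
      rw [PySem.Dict.keys_insert_of_contains _ _ hdesc,
          PySem.Dict.keys_insert_of_contains _ _ hdist]
      exact pv_keys_s1 ann
    · rw [PySem.Dict.keys_insert_of_contains _ _ hdist]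
      exact pv_keys_s1 ann

-- the final per-key value equals B's one-lookup value
lemma pv_val_s3 (ann : List (String × String)) (hpre : (ann.map Prod.fst).Nodup)
    (k : String) (hk : k ∈ pvAttrsA) :
    (pvS3 ann).getD k none = pvValueFor ann k := by
  have hkc : pvAttrsA.contains k = true := by simpa using hk
  have hbase := pv_base_val ann k hpre hkc
  unfold pvS3 pvValueFor
  cases hbd : (PySem.Dict.mk ann).get? "best_distance" with
  | none =>
    have hc : (PySem.Dict.mk ann).contains "best_distance" = false := by
      rw [PySem.Dict.contains_eq_isSome_get?, hbd]; rfl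
    dsimp only
    cases hdc : (PySem.Dict.mk ann).contains "description" with
    | true =>
      rw [if_neg (by simp)]
      rw [if_neg (by rw [hc]; simp), if_neg (by simp)]
      exact hbase
    | false =>
      rw [if_pos (by decide), PySem.Dict.getD_insert]
      by_cases h2 : k = "description"
      · rw [if_pos h2, if_neg (by rw [h2]; simp), if_pos (by rw [h2]; simp)]
      · rw [if_neg h2, if_neg (by rw [hc]; simp), if_neg (by simp [h2])]
        exact hbase
  | some bd =>
    have hc : (PySem.Dict.mk ann).contains "best_distance" = true := by
      rw [PySem.Dict.contains_eq_isSome_get?, hbd]; rfl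
    dsimp only
    cases hdc : (PySem.Dict.mk ann).contains "description" with
    | true =>
      rw [if_neg (by simp)]
      rw [PySem.Dict.getD_insert]
      by_cases h1 : k = "distance"
      · rw [if_pos h1, if_pos (by rw [h1, hc]; simp)]
      · rw [if_neg h1, if_neg (by simp [h1]), if_neg (by simp)]
        exact hbase
    | false =>
      rw [if_pos (by decide)]
      rw [PySem.Dict.getD_insert]
      by_cases h2 : k = "description"
      · rw [if_pos h2, if_neg (by rw [h2]; simp), if_pos (by rw [h2]; simp)]
      · rw [if_neg h2, PySem.Dict.getD_insert]
        by_cases h1 : k = "distance"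
        · rw [if_pos h1, if_pos (by rw [h1, hc]; simp)]
        · rw [if_neg h1, if_neg (by simp [h1]), if_neg (by simp [h2])]
          exact hbase

-- ===== VERDICT (by name: the statement is the Claim_ definition above) =====
theorem create_insert_sherlock_spec : Claim_equal_create_insert_sherlock := by
  intro ann _ hpre
  show create_insert_sherlock ann = create_insert_sherlock_alt ann
  have hA : create_insert_sherlock ann =
      "REPLACE INTO sherlock_classifications SET " ++
        PySem.Str.join ",\n" ((pvS3 ann).items.foldl (fun acc kv =>
          acc ++ [match kv.2 with
                  | none => kv.1 ++ "=NULL"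
                  | some v => kv.1 ++ "='" ++ PySem.Str.replace v "'" "" ++ "'"]) []) := rfl
  rw [hA, PySem.List.foldl_append_singleton_eq_map, List.nil_append]
  have hnd3 : (pvS3 ann).keys.Nodup := by rw [pv_keys_s3]; decide
  rw [PySem.Dict.items_eq_map_keys (pvS3 ann) hnd3 none, pv_keys_s3, List.map_map]
  show _ = "REPLACE INTO sherlock_classifications SET " ++
      PySem.Str.join ",\n" (pvAttrsB.map (fun key => pvFmt key (pvValueFor ann key)))
  have hBA : pvAttrsB = pvAttrsA := rfl
  rw [hBA]
  congr 1
  congr 1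
  apply List.map_congr_left
  intro k hk
  simp only [Function.comp_apply]
  rw [pv_val_s3 ann hpre k hk]
  exact rfl
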